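-- pv_equiv track=rewrite | github.com/raeez/chiral-bar-cobar | compute/lib/bar_cohomology_dimensions.py | riordan_number
-- ===== SOURCE A (Python) =====
-- def riordan_number(n: int) -> int:
--     """Riordan number R(n), OEIS A005043."""
--     if n <= 0:
--         return 1
--     if n == 1:
--         return 0
--     R = [1, 0]
--     for k in range(2, n + 1):
--         num = (k - 1) * (2 * R[k-1] + 3 * R[k-2])
--         assert num % (k + 1) == 0
--         R.append(num // (k + 1))
--     return R[n]
-- ===== SOURCE B (Python) =====
-- def riordan_number(n: int) -> int:
--     """Riordan number R(n), OEIS A005043, as the inverse binomial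
--     transform of the Catalan numbers:
--         R(n) = sum_{k=0}^{n} (-1)^(n-k) * C(n,k) * Catalan(k).
--     One pass, maintaining term = C(n,k)*Catalan(k) incrementally
--     (the division in the update is exact)."""
--     if n <= 0:
--         return 1
--     total = 0
--     term = 1                        # C(n,k) * Catalan(k)
--     sign = -1 if n % 2 == 1 else 1  # (-1)^(n-k)
--     for k in range(n + 1):
--         total += sign * term
--         sign = -sign
--         term = term * ((n - k) * (4 * k + 2)) // ((k + 1) * (k + 2))
--     return total
-- ===== Notes on version B (the rewrite author's own statement) =====
-- stated objective: alternative
-- what changed: Replaces the three-term Riordan recurrence DP over a growing list by a single pass summing the inverse binomial transform of the Catalan numbers, R(n) = sum_k (-1)^(n-k) C(n,k) Catalan(k), with the binomial and Catalan factors maintained incrementally.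
import Mathlib
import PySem

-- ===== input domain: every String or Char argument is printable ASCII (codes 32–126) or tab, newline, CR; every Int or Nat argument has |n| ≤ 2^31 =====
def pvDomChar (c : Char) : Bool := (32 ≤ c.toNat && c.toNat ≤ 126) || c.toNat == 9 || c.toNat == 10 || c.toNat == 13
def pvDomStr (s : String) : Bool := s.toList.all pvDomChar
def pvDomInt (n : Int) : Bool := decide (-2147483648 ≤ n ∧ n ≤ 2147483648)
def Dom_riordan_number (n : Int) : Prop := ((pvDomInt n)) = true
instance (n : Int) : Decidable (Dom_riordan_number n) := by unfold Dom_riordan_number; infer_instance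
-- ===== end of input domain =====

-- B replaces A's three-term recurrence DP on a growing list by a one-pass sum of the
-- inverse binomial transform of the Catalan numbers (alternative algorithm, same cost).

-- ===== PORT A =====
-- A's list indices R[k-1], R[k-2], R[n] are always in range, so pyGetD with default 0
-- computes exactly Python's R[...]; A's assert never fires (proved below via Rseq_rec).
def riordan_number (n : Int) : Int :=
  if n ≤ 0 then 1
  else if n = 1 then 0
  else
    let R := (PySem.List.pyRange 2 (n + 1) 1).foldl
      (fun R k =>
        R ++ [PySem.Int.floordiv
                ((k - 1) * (2 * PySem.List.pyGetD R (k - 1) 0 +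
                            3 * PySem.List.pyGetD R (k - 2) 0))
                (k + 1)])
      [1, 0]
    PySem.List.pyGetD R n 0

-- ===== PORT B =====
-- state = (total, term, sign)
def riordan_number_alt (n : Int) : Int :=
  if n ≤ 0 then 1
  else
    let s := (PySem.List.pyRange 0 (n + 1) 1).foldl
      (fun (st : Int × Int × Int) k =>
        (st.1 + st.2.2 * st.2.1,
         PySem.Int.floordiv (st.2.1 * ((n - k) * (4 * k + 2))) ((k + 1) * (k + 2)),
         -st.2.2))
      (0, 1, if PySem.Int.mod n 2 = 1 then -1 else 1)
    s.1

-- ===== PRECONDITION & SPEC =====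
def Spec_riordan_number (n : Int) (out : Int) : Prop := out = riordan_number_alt n
instance (n : Int) (out : Int) : Decidable (Spec_riordan_number n out) := by unfold Spec_riordan_number; infer_instance

-- ===== CLAIM (what is proved, stated in full; the proofs are below) =====
def Claim_equal_riordan_number : Prop := ∀ (n : Int), Dom_riordan_number n → Spec_riordan_number n (riordan_number n)

-- ===== LEMMAS AND PROOFS =====

-- The common mathematical value: R(n) = Σ_{k≤n} (-1)^(n+k) C(n,k) Catalan(k).
def Rseq (n : ℕ) : ℤ :=
  ∑ k ∈ Finset.range (n + 1), (-1) ^ (n + k) * (n.choose k : ℤ) * (catalan k : ℤ)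

-- telescoping certificate for the Zeilberger proof of the P-recurrence of Rseq
def Gcert (m : ℕ) : ℕ → ℤ
  | 0 => 0
  | j + 1 => (-1) ^ (m + j) * ((m + 1).choose j : ℤ) * (Nat.centralBinom (j + 1) : ℤ)

-- (j+1)·C(m+1,j+1) = (m+1-j)·C(m+1,j), over ℤ (valid for all j)
lemma absB (m j : ℕ) :
    ((j : ℤ) + 1) * ((m + 1).choose (j + 1) : ℤ)
      = ((m : ℤ) + 1 - j) * ((m + 1).choose j : ℤ) := by
  rcases le_or_gt j (m + 1) with h | h
  · have := Nat.choose_succ_right_eq (m + 1) j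
    have hcast : (((m + 1).choose (j + 1) * (j + 1) : ℕ) : ℤ)
        = (((m + 1).choose j * (m + 1 - j) : ℕ) : ℤ) := by rw [this]
    push_cast [Nat.cast_sub h] at hcast
    linarith
  · rw [Nat.choose_eq_zero_of_lt (by omega), Nat.choose_eq_zero_of_lt (by omega)]
    ring

-- (m+1)·C(m,j) = (j+1)·C(m+1,j+1), over ℤ
lemma absA (m j : ℕ) :
    ((m : ℤ) + 1) * (m.choose j : ℤ) = ((j : ℤ) + 1) * ((m + 1).choose (j + 1) : ℤ) := by
  have h := Nat.add_one_mul_choose_eq m j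
  have h' := congrArg (fun x : ℕ => (x : ℤ)) h
  push_cast at h'
  linarith

-- the pure binomial identity (†)
lemma choose_lin (m j : ℕ) :
    ((m : ℤ) + 3) * ((m + 2).choose (j + 1) : ℤ) + 2 * ((m : ℤ) + 1) * ((m + 1).choose (j + 1) : ℤ)
      = 3 * ((m : ℤ) + 1) * (m.choose (j + 1) : ℤ)
        + 2 * (2 * (j : ℤ) + 3) * ((m + 1).choose (j + 1) : ℤ)
        + ((j : ℤ) + 2) * ((m + 1).choose j : ℤ) := by
  have hp2 : ((m + 2).choose (j + 1) : ℤ) = ((m + 1).choose j : ℤ) + ((m + 1).choose (j + 1) : ℤ) := by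
    have := Nat.choose_succ_succ (m + 1) j
    exact_mod_cast this
  have hp1 : ((m + 1).choose (j + 1) : ℤ) = (m.choose j : ℤ) + (m.choose (j + 1) : ℤ) := by
    have := Nat.choose_succ_succ m j
    exact_mod_cast this
  have hA := absA m j
  have hB := absB m j
  linear_combination ((m : ℤ) + 3) * hp2 + 3 * ((m : ℤ) + 1) * hp1 + 3 * hA - hB

-- (k+1)·Catalan(k) = centralBinom(k), over ℤ
lemma cat_cb (k : ℕ) : ((k : ℤ) + 1) * (catalan k : ℤ) = (Nat.centralBinom k : ℤ) := by
  have h' := congrArg (fun x : ℕ => (x : ℤ)) (succ_mul_catalan_eq_centralBinom k)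
  push_cast at h'
  linarith

-- (k+2)·centralBinom(k+2) = 2(2k+3)·centralBinom(k+1), over ℤ
lemma cb_rec (k : ℕ) :
    ((k : ℤ) + 2) * (Nat.centralBinom (k + 2) : ℤ)
      = 2 * (2 * (k : ℤ) + 3) * (Nat.centralBinom (k + 1) : ℤ) := by
  have h := Nat.succ_mul_centralBinom_succ (k + 1)
  have h' := congrArg (fun x : ℕ => (x : ℤ)) h
  push_cast at h'
  linear_combination h'

-- per-term certificate identity
lemma per_term (m k : ℕ) :
    ((m : ℤ) + 3) * ((-1) ^ (m + 2 + k) * ((m + 2).choose k : ℤ) * (catalan k : ℤ))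
      - ((m : ℤ) + 1) * (2 * ((-1) ^ (m + 1 + k) * ((m + 1).choose k : ℤ) * (catalan k : ℤ))
                          + 3 * ((-1) ^ (m + k) * (m.choose k : ℤ) * (catalan k : ℤ)))
      = Gcert m (k + 1) - Gcert m k := by
  cases k with
  | zero =>
      norm_num [Gcert, Nat.centralBinom, pow_add]
      ring
  | succ j =>
      have hne : ((j : ℤ) + 2) ≠ 0 := by positivity
      apply mul_left_cancel₀ hne
      rw [show m + 2 + (j + 1) = (m + j) + 3 by omega, show m + 1 + (j + 1) = (m + j) + 2 by omega,
          show m + (j + 1) = (m + j) + 1 by omega]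
      simp only [Gcert]
      rw [show m + (j + 1) = (m + j) + 1 by omega]
      have hc := cat_cb (j + 1)
      have hcb := cb_rec j
      have hlin := choose_lin m j
      have hGk : (Nat.centralBinom (j + 1) : ℤ) = ((j : ℤ) + 2) * (catalan (j + 1) : ℤ) := by
        rw [← hc]; push_cast; ring
      rw [hGk] at hcb ⊢
      linear_combination (-((-1 : ℤ) ^ (m + j))) * ((j : ℤ) + 2) * (catalan (j + 1) : ℤ) * hlin
        + ((-1 : ℤ)) ^ (m + j) * (((m + 1).choose (j + 1) : ℤ)) * hcb

-- the P-recurrence of Rseq: (m+3)·R(m+2) = (m+1)·(2·R(m+1) + 3·R(m))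
lemma Rseq_rec (m : ℕ) :
    ((m : ℤ) + 3) * Rseq (m + 2) = ((m : ℤ) + 1) * (2 * Rseq (m + 1) + 3 * Rseq m) := by
  have tel : ∑ k ∈ Finset.range (m + 3), (Gcert m (k + 1) - Gcert m k)
      = Gcert m (m + 3) - Gcert m 0 := Finset.sum_range_sub (Gcert m) (m + 3)
  have hG0 : Gcert m 0 = 0 := rfl
  have hGtop : Gcert m (m + 3) = 0 := by
    simp [Gcert, Nat.choose_eq_zero_of_lt (by omega : m + 1 < m + 2)]
  have hsum : ∑ k ∈ Finset.range (m + 3),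
      (((m : ℤ) + 3) * ((-1) ^ (m + 2 + k) * ((m + 2).choose k : ℤ) * (catalan k : ℤ))
        - ((m : ℤ) + 1) * (2 * ((-1) ^ (m + 1 + k) * ((m + 1).choose k : ℤ) * (catalan k : ℤ))
                            + 3 * ((-1) ^ (m + k) * (m.choose k : ℤ) * (catalan k : ℤ)))) = 0 := by
    rw [Finset.sum_congr rfl (fun k _ => per_term m k), tel, hG0, hGtop]; ring
  have e2 : ∑ k ∈ Finset.range (m + 3),
      (-1 : ℤ) ^ (m + 2 + k) * ((m + 2).choose k : ℤ) * (catalan k : ℤ) = Rseq (m + 2) := rfl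
  have e1 : ∑ k ∈ Finset.range (m + 3),
      (-1 : ℤ) ^ (m + 1 + k) * ((m + 1).choose k : ℤ) * (catalan k : ℤ) = Rseq (m + 1) := by
    rw [Finset.sum_range_succ]
    simp [Rseq, Nat.choose_eq_zero_of_lt (by omega : m + 1 < m + 2)]
  have e0 : ∑ k ∈ Finset.range (m + 3),
      (-1 : ℤ) ^ (m + k) * (m.choose k : ℤ) * (catalan k : ℤ) = Rseq m := by
    rw [Finset.sum_range_succ, Finset.sum_range_succ]
    simp [Rseq, Nat.choose_eq_zero_of_lt (by omega : m < m + 1),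
          Nat.choose_eq_zero_of_lt (by omega : m < m + 2)]
  rw [Finset.sum_sub_distrib] at hsum
  rw [← Finset.mul_sum, e2] at hsum
  have : ∑ k ∈ Finset.range (m + 3),
      ((m : ℤ) + 1) * (2 * ((-1) ^ (m + 1 + k) * ((m + 1).choose k : ℤ) * (catalan k : ℤ))
        + 3 * ((-1) ^ (m + k) * (m.choose k : ℤ) * (catalan k : ℤ)))
      = ((m : ℤ) + 1) * (2 * Rseq (m + 1) + 3 * Rseq m) := by
    rw [← Finset.mul_sum, Finset.sum_add_distrib, ← Finset.mul_sum, ← Finset.mul_sum, e1, e0]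
  rw [this] at hsum
  linarith

lemma Rseq_zero : Rseq 0 = 1 := by simp [Rseq]
lemma Rseq_one : Rseq 1 = 0 := by
  simp [Rseq, Finset.sum_range_succ, catalan_one]

-- the exact-division step used by port A
lemma Rseq_step (m : ℕ) :
    PySem.Int.floordiv (((m : ℤ) + 1) * (2 * Rseq (m + 1) + 3 * Rseq m)) ((m : ℤ) + 3)
      = Rseq (m + 2) := by
  rw [← Rseq_rec, PySem.Int.floordiv_eq_ediv_of_pos (by positivity)]
  exact Int.mul_ediv_cancel_left _ (by positivity)

-- ---- port A bridge ----

lemma foldA (j : ℕ) :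
    (PySem.List.pyRange 2 (2 + (j : ℤ)) 1).foldl
      (fun R k =>
        R ++ [PySem.Int.floordiv
                ((k - 1) * (2 * PySem.List.pyGetD R (k - 1) 0 +
                            3 * PySem.List.pyGetD R (k - 2) 0))
                (k + 1)])
      [1, 0]
      = (List.range (2 + j)).map Rseq := by
  induction j with
  | zero =>
      rw [PySem.List.pyRange_one_eq_nil (by norm_num)]
      simp [List.range_succ, Rseq_zero, Rseq_one]
  | succ j ih =>
      rw [show (2 + ((j : ℕ) + 1 : ℕ) : ℤ) = (2 + (j : ℤ)) + 1 by push_cast; ring,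
          PySem.List.pyRange_one_succ_right (by omega), List.foldl_append, ih]
      simp only [List.foldl_cons, List.foldl_nil]
      have hlen : ((List.range (2 + j)).map Rseq).length = 2 + j := by simp
      have hget1 : PySem.List.pyGetD ((List.range (2 + j)).map Rseq) ((2 + (j : ℤ)) - 1) 0
          = Rseq (j + 1) := by
        rw [show (2 + (j : ℤ)) - 1 = ((j + 1 : ℕ) : ℤ) by push_cast; ring]
        rw [PySem.List.pyGetD_natCast]
        rw [List.getD_eq_getElem _ _ (by simp only [List.length_map, List.length_range]; omega)]
        simp
      have hget2 : PySem.List.pyGetD ((List.range (2 + j)).map Rseq) ((2 + (j : ℤ)) - 2) 0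
          = Rseq j := by
        rw [show (2 + (j : ℤ)) - 2 = ((j : ℕ) : ℤ) by push_cast; ring]
        rw [PySem.List.pyGetD_natCast]
        rw [List.getD_eq_getElem _ _ (by simp only [List.length_map, List.length_range]; omega)]
        simp
      rw [hget1, hget2,
          show (2 + (j : ℤ)) - 1 = ((j : ℤ) + 1) by ring,
          show (2 + (j : ℤ)) + 1 = ((j : ℤ) + 3) by ring]
      rw [Rseq_step j]
      rw [show 2 + (j + 1) = (2 + j) + 1 by omega, List.range_succ]
      simp [show 2 + j = j + 2 by omega]

lemma portA_eq (n : Int) (h : 2 ≤ n) : riordan_number n = Rseq n.toNat := by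
  have h0 : ¬ n ≤ 0 := by omega
  have h1 : n ≠ 1 := by omega
  rw [riordan_number]
  simp only [h0, h1, if_false]
  have hn : n = ((n.toNat : ℕ) : ℤ) := by omega
  obtain ⟨j, hj⟩ : ∃ j : ℕ, n.toNat = 2 + j := ⟨n.toNat - 2, by omega⟩
  rw [show n + 1 = 2 + ((j : ℤ) + 1) by omega]
  rw [show (2 + ((j : ℤ) + 1)) = (2 + ((j + 1 : ℕ) : ℤ)) by push_cast; ring]
  rw [foldA (j + 1)]
  rw [show n = ((2 + j : ℕ) : ℤ) by omega, PySem.List.pyGetD_natCast]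
  rw [List.getD_eq_getElem _ _ (by simp only [List.length_map, List.length_range]; omega)]
  simp only [List.getElem_map, List.getElem_range]
  congr 1

-- ---- port B bridge ----

def stepB (n : Int) : (Int × Int × Int) → Int → (Int × Int × Int) :=
  fun st k =>
    (st.1 + st.2.2 * st.2.1,
     PySem.Int.floordiv (st.2.1 * ((n - k) * (4 * k + 2))) ((k + 1) * (k + 2)),
     -st.2.2)

def stateB (N j : ℕ) : Int × Int × Int :=
  (∑ k ∈ Finset.range j, (-1) ^ (N + k) * (N.choose k : ℤ) * (catalan k : ℤ),
   (N.choose j : ℤ) * (catalan j : ℤ), (-1) ^ (N + j))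

-- (j+2)·Catalan(j+1) = (4j+2)·Catalan(j), over ℤ
lemma catalan_step (j : ℕ) :
    ((j : ℤ) + 2) * (catalan (j + 1) : ℤ) = (4 * (j : ℤ) + 2) * (catalan j : ℤ) := by
  have h1 := cat_cb (j + 1)
  have h2 := Nat.succ_mul_centralBinom_succ j
  have h2' : ((j : ℤ) + 1) * (Nat.centralBinom (j + 1) : ℤ)
      = 2 * (2 * (j : ℤ) + 1) * (Nat.centralBinom j : ℤ) := by exact_mod_cast h2
  have h3 := cat_cb j
  have hne : ((j : ℤ) + 1) ≠ 0 := by positivity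
  apply mul_left_cancel₀ hne
  push_cast at h1 ⊢
  linear_combination ((j : ℤ) + 1) * h1 + h2' - 2 * (2 * (j : ℤ) + 1) * h3

-- C(N,j)·(N-j) = (j+1)·C(N,j+1), over ℤ (for j ≤ N)
lemma choose_step (N j : ℕ) (hle : j ≤ N) :
    (N.choose j : ℤ) * ((N : ℤ) - (j : ℤ)) = ((j : ℤ) + 1) * (N.choose (j + 1) : ℤ) := by
  have h := Nat.choose_succ_right_eq N j
  have hcast : ((N.choose (j + 1) * (j + 1) : ℕ) : ℤ) = ((N.choose j * (N - j) : ℕ) : ℤ) := by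
    rw [h]
  push_cast [Nat.cast_sub hle] at hcast
  linarith

lemma foldB (N : ℕ) (d j : ℕ) (hj : j + d = N + 1) :
    (PySem.List.pyRange (j : ℤ) ((N : ℤ) + 1) 1).foldl (stepB (N : ℤ)) (stateB N j)
      = stateB N (N + 1) := by
  induction d generalizing j with
  | zero =>
      rw [show (j : ℤ) = (N : ℤ) + 1 by omega, PySem.List.pyRange_one_eq_nil le_rfl]
      rw [show j = N + 1 by omega]
      rfl
  | succ d ih =>
      rw [PySem.List.pyRange_one_cons (by omega)]
      rw [List.foldl_cons]
      have hstep : stepB (N : ℤ) (stateB N j) (j : ℤ) = stateB N (j + 1) := by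
        unfold stepB stateB
        have hterm : PySem.Int.floordiv
            ((N.choose j : ℤ) * (catalan j : ℤ) * (((N : ℤ) - (j : ℤ)) * (4 * (j : ℤ) + 2)))
            (((j : ℤ) + 1) * ((j : ℤ) + 2))
            = (N.choose (j + 1) : ℤ) * (catalan (j + 1) : ℤ) := by
          have hb := choose_step N j (by omega)
          have hc := catalan_step j
          have hprod : (N.choose j : ℤ) * (catalan j : ℤ) * (((N : ℤ) - (j : ℤ)) * (4 * (j : ℤ) + 2))
              = (((j : ℤ) + 1) * ((j : ℤ) + 2)) * ((N.choose (j + 1) : ℤ) * (catalan (j + 1) : ℤ)) := by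
            linear_combination (4 * (j : ℤ) + 2) * (catalan j : ℤ) * hb
              - ((j : ℤ) + 1) * ((N.choose (j + 1) : ℤ)) * hc
          rw [hprod, PySem.Int.floordiv_eq_ediv_of_pos (by positivity)]
          exact Int.mul_ediv_cancel_left _ (by positivity)
        simp only [hterm]
        rw [Finset.sum_range_succ]
        rw [show N + (j + 1) = (N + j) + 1 by omega, pow_succ]
        simp only [Prod.mk.injEq]
        refine ⟨by ring, trivial, by ring⟩
      rw [hstep, show (j : ℤ) + 1 = ((j + 1 : ℕ) : ℤ) by push_cast; ring]
      exact ih (j + 1) (by omega)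

lemma portB_eq (n : Int) (h : 1 ≤ n) : riordan_number_alt n = Rseq n.toNat := by
  have h0 : ¬ n ≤ 0 := by omega
  rw [riordan_number_alt]
  simp only [h0, if_false]
  set N := n.toNat with hN
  have hn : n = ((N : ℕ) : ℤ) := by omega
  have hmod : PySem.Int.mod n 2 = ((N % 2 : ℕ) : ℤ) := by
    rw [PySem.Int.mod_eq_emod_of_pos (by norm_num), hn]
    omega
  have hsign : (if PySem.Int.mod n 2 = 1 then (-1 : ℤ) else 1) = (-1) ^ (N + 0) := by
    rw [hmod]
    rcases Nat.even_or_odd N with he | ho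
    · have h0' : N % 2 = 0 := Nat.even_iff.mp he
      rw [h0', if_neg (by norm_num), Nat.add_zero, Even.neg_one_pow he]
    · have h1' : N % 2 = 1 := Nat.odd_iff.mp ho
      rw [h1', if_pos (by norm_num), Nat.add_zero, Odd.neg_one_pow ho]
  rw [hsign, hn]
  have hinit : ((0 : ℤ), (1 : ℤ), (-1 : ℤ) ^ (N + 0)) = stateB N 0 := by
    simp [stateB]
  rw [hinit]
  show ((PySem.List.pyRange ((0 : ℕ) : ℤ) ((N : ℤ) + 1) 1).foldl (stepB (N : ℤ)) (stateB N 0)).1 = Rseq N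
  rw [foldB N (N + 1) 0 (by omega)]
  rfl

-- ===== VERDICT (by name: the statement is the Claim_ definition above) =====
theorem riordan_number_spec : Claim_equal_riordan_number := by
  intro n _
  unfold Spec_riordan_number
  rcases le_or_gt n 0 with h | h
  · rw [riordan_number, riordan_number_alt]; simp [h]
  · rcases eq_or_lt_of_le (by omega : 1 ≤ n) with h1 | h1
    · rw [portB_eq n (by omega), riordan_number, ← h1]
      norm_num [← h1, Rseq_one]
    · rw [portA_eq n (by omega), portB_eq n (by omega)]
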